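-- pv_equiv track=rewrite | github.com/NEBULA1978/ejercicios-PY | ejercicio41.py | triangulo
-- ===== SOURCE A (Python) =====
-- import math
--
-- def triangulo(numero):
--     mitad = math.floor(numero - 1)
--     resultado = ""
--
--     # bucle total filas
--     for fila in range(numero):
--         nivel = ""
--
--         # bucle para pintar asteriscos y espacios
--         for columna in range(2 * numero - 1):
--
--             if mitad - fila <= columna and mitad + fila >= columna:
--                 nivel += "*"
--             else:
--                 nivel += " "
--
--         resultado += nivel + "\n"
--
--     return resultado
-- ===== SOURCE B (Python) =====
-- def triangulo(numero):
--     resultado = ""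
--     for fila in range(numero):
--         pad = " " * (numero - 1 - fila)
--         resultado += pad + "*" * (2 * fila + 1) + pad + "\n"
--     return resultado
-- ===== Notes on version B (the rewrite author's own statement) =====
-- stated objective: simpler
-- what changed: B computes each row directly from counts (numero-1-fila spaces, 2*fila+1 stars, same trailing spaces) via string repetition, removing A's inner per-column loop with its membership test and character-by-character appends.
import Mathlib
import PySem

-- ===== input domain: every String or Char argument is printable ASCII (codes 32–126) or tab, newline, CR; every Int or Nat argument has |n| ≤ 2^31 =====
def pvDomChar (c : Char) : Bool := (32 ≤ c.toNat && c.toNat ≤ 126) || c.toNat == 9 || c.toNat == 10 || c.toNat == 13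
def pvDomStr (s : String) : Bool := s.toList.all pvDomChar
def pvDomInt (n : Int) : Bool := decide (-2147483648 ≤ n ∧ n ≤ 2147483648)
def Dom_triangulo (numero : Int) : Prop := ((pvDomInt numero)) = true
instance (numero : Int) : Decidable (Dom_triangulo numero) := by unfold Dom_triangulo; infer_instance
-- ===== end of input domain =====

-- B builds each row from arithmetic counts (pad/stars/pad via string repetition) instead of
-- A's per-column membership loop: simpler.

-- ===== PORT A =====
def triangulo (numero : Int) : String :=
  let mitad := numero - 1   -- math.floor(numero - 1) on an int is the int itself
  (PySem.List.pyRange 0 numero 1).foldl (fun resultado fila =>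
    let nivel := (PySem.List.pyRange 0 (2 * numero - 1) 1).foldl
      (fun nivel columna =>
        if mitad - fila ≤ columna ∧ mitad + fila ≥ columna then nivel ++ "*" else nivel ++ " ")
      ""
    resultado ++ (nivel ++ "\n")) ""

-- ===== PORT B =====
def triangulo_alt (numero : Int) : String :=
  (PySem.List.pyRange 0 numero 1).foldl (fun resultado fila =>
    let pad := String.ofList (PySem.List.pyRepeat [' '] (numero - 1 - fila))
    resultado ++ (pad ++ String.ofList (PySem.List.pyRepeat ['*'] (2 * fila + 1)) ++ pad ++ "\n")) ""

-- ===== PRECONDITION & SPEC =====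
def Spec_triangulo (numero : Int) (out : String) : Prop := out = triangulo_alt numero
instance (numero : Int) (out : String) : Decidable (Spec_triangulo numero out) := by unfold Spec_triangulo; infer_instance

-- ===== CLAIM (what is proved, stated in full; the proofs are below) =====
def Claim_equal_triangulo : Prop := ∀ (numero : Int), Dom_triangulo numero → Spec_triangulo numero (triangulo numero)

-- ===== LEMMAS AND PROOFS =====

-- A's inner character loop, read off as the map of its predicate over the columns.
theorem inner_fold_toList (P : Int → Prop) [DecidablePred P] (l : List Int) (init : String) :
    (l.foldl (fun s c => if P c then s ++ "*" else s ++ " ") init).toList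
      = init.toList ++ l.map (fun c => if P c then '*' else ' ') := by
  induction l generalizing init with
  | nil => simp
  | cons x xs ih =>
    simp only [List.foldl_cons, List.map_cons]
    by_cases h : P x <;> simp [h, ih, String.toList_append]

-- a window [a, a+w) painted over a+w+a columns is pad ++ stars ++ pad
theorem range_window (a w : Nat) :
    (List.range (a + w + a)).map (fun k => if a ≤ k ∧ k < a + w then '*' else ' ')
      = List.replicate a ' ' ++ List.replicate w '*' ++ List.replicate a ' ' := by
  rw [List.range_add, List.range_add]
  simp only [List.map_append, List.map_map]
  congr 1
  · congr 1
    · rw [List.eq_replicate_iff]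
      refine ⟨by simp, ?_⟩
      intro b hb
      simp only [List.mem_map, List.mem_range] at hb
      obtain ⟨k, hk, rfl⟩ := hb
      simp [Nat.not_le.mpr hk]
    · rw [List.eq_replicate_iff]
      refine ⟨by simp, ?_⟩
      intro b hb
      simp only [List.mem_map, List.mem_range, Function.comp] at hb
      obtain ⟨k, hk, rfl⟩ := hb
      have h1 : a ≤ a + k := Nat.le_add_right a k
      have h2 : a + k < a + w := by omega
      simp [h1, h2]
  · rw [List.eq_replicate_iff]
    refine ⟨by simp, ?_⟩
    intro b hb
    simp only [List.mem_map, List.mem_range, Function.comp] at hb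
    obtain ⟨k, hk, rfl⟩ := hb
    have : ¬ (a + w + k < a + w) := by omega
    simp [this]

-- the per-row bodies of A and B agree for every admitted row index
theorem row_eq (numero fila : Int) (h0 : 0 ≤ fila) (h1 : fila < numero) (acc : String) :
    (acc ++ ((PySem.List.pyRange 0 (2 * numero - 1) 1).foldl
        (fun nivel columna =>
          if numero - 1 - fila ≤ columna ∧ numero - 1 + fila ≥ columna then nivel ++ "*" else nivel ++ " ")
        "" ++ "\n"))
      = acc ++ (String.ofList (PySem.List.pyRepeat [' '] (numero - 1 - fila))
          ++ String.ofList (PySem.List.pyRepeat ['*'] (2 * fila + 1))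
          ++ String.ofList (PySem.List.pyRepeat [' '] (numero - 1 - fila)) ++ "\n") := by
  set a : Nat := (numero - 1 - fila).toNat with ha
  set w : Nat := (2 * fila + 1).toNat with hw
  apply String.toList_inj.mp
  have hrange : PySem.List.pyRange 0 (2 * numero - 1) 1
      = (List.range (a + w + a)).map (fun k : Nat => (k : Int)) := by
    rw [PySem.List.pyRange_one]
    have : (2 * numero - 1 - 0).toNat = a + w + a := by omega
    rw [this]
    simp only [zero_add]
  rw [hrange]
  simp only [String.toList_append, inner_fold_toList, List.map_map]
  have hmap : (List.range (a + w + a)).map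
      ((fun c => if numero - 1 - fila ≤ c ∧ numero - 1 + fila ≥ c then '*' else ' ') ∘ (fun k : Nat => (k : Int)))
      = (List.range (a + w + a)).map (fun k => if a ≤ k ∧ k < a + w then '*' else ' ') := by
    apply List.map_congr_left
    intro k _
    simp only [Function.comp]
    congr 1
    rw [eq_iff_iff]
    constructor <;> intro h <;> exact ⟨by omega, by omega⟩
  rw [hmap, range_window]
  simp only [String.toList_ofList, PySem.List.pyRepeat_singleton, ← ha, ← hw, List.append_assoc,
    String.toList_empty, List.nil_append]

-- ===== VERDICT (by name: the statement is the Claim_ definition above) =====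
theorem triangulo_spec : Claim_equal_triangulo := by
  intro numero _
  unfold Spec_triangulo triangulo triangulo_alt
  apply PySem.List.foldl_congr_mem
  intro acc fila hmem
  rw [PySem.List.mem_pyRange_one] at hmem
  exact row_eq numero fila hmem.1 hmem.2 acc
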